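-- pv_equiv track=rewrite | github.com/zeyongj/LeetCode | 2202-sum-of-k-mirror-numbers/2202-sum-of-k-mirror-numbers.py | solve
-- ===== SOURCE A (Python) =====
-- def solve(pre, is_odd):
--     tmp = pre
--     if is_odd:
--         tmp //= 10
--
--     while tmp > 0:
--         pre = pre * 10 + (tmp % 10)  # 11 + 3 => 113? // 11*10 + 3 = 113
--         tmp //= 10
--
--     return pre
-- ===== SOURCE B (Python) =====
-- def solve(pre, is_odd):
--     s = str(pre)
--     tail = s[:-1] if is_odd else s
--     total = pre
--     for ch in reversed(tail):
--         total = total * 10 + (ord(ch) - 48)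
--     return total
-- ===== Notes on version B (the rewrite author's own statement) =====
-- stated objective: idiomatic
-- what changed: B mirrors pre by string manipulation (str, slice off last char when is_odd, iterate the reversed characters with ord arithmetic) instead of A's repeated %10 / //10 division loop on a shadow integer.
-- outside the precondition, e.g. on solve(-5, False): A returns -5, B returns -453
import Mathlib
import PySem

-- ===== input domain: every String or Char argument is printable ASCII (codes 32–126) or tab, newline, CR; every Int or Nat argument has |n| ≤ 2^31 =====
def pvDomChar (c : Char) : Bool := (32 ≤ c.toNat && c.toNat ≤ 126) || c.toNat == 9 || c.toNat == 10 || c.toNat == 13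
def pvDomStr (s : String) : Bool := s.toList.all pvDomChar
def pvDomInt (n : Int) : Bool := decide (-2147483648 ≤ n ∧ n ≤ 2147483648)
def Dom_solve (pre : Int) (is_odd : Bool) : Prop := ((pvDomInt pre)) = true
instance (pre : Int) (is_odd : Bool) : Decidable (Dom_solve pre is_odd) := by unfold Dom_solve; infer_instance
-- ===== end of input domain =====

-- B mirrors the prefix by string manipulation (str / slice / reversed chars with ord arithmetic) instead of A's %10-//10 division loop; same cost, more idiomatic.


-- ===== PORT A =====
-- the while loop of A: state (pre, tmp), body pre = pre*10 + tmp % 10; tmp //= 10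
def solveLoop (pre tmp : Int) : Int :=
  if h : 0 < tmp then
    solveLoop (pre * 10 + PySem.Int.mod tmp 10) (PySem.Int.floordiv tmp 10)
  else pre
termination_by tmp.toNat
decreasing_by
  simp only [PySem.Int.floordiv]
  simp only [Int.fdiv_eq_ediv]
  norm_num
  omega

def solve (pre : Int) (is_odd : Bool) : Int :=
  solveLoop pre (if is_odd then PySem.Int.floordiv pre 10 else pre)

-- ===== PORT B =====
def solve_alt (pre : Int) (is_odd : Bool) : Int :=
  let s := PySem.Int.toChars pre                                        -- s = str(pre)
  let tail := if is_odd then PySem.List.slice s none (some (-1)) else s -- s[:-1] if is_odd else s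
  tail.reverse.foldl (fun total ch => total * 10 + ((ch.toNat : Int) - 48)) pre
  -- for ch in reversed(tail): total = total * 10 + (ord(ch) - 48)

-- ===== PRECONDITION & SPEC =====
-- Pre_ excludes negative pre, outside this mirroring helper's natural domain: A returns pre
-- unchanged there (its loop never runs) while B's string arithmetic reads the '-' sign as a digit.
def Pre_solve (pre : Int) (is_odd : Bool) : Prop := 0 ≤ pre
instance (pre : Int) (is_odd : Bool) : Decidable (Pre_solve pre is_odd) := by unfold Pre_solve; infer_instance
def pvWitness_solve : Int × Bool := (123, true)
def Spec_solve (pre : Int) (is_odd : Bool) (out : Int) : Prop := out = solve_alt pre is_odd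
instance (pre : Int) (is_odd : Bool) (out : Int) : Decidable (Spec_solve pre is_odd out) := by unfold Spec_solve; infer_instance

-- ===== CLAIM (what is proved, stated in full; the proofs are below) =====
def Claim_equal_solve : Prop := ∀ (pre : Int) (is_odd : Bool), Dom_solve pre is_odd → Pre_solve pre is_odd → Spec_solve pre is_odd (solve pre is_odd)

-- ===== LEMMAS AND PROOFS =====

lemma floordiv_natCast_ten (m : ℕ) : PySem.Int.floordiv (m : Int) 10 = ((m / 10 : ℕ) : Int) := by
  simp only [PySem.Int.floordiv]
  simp only [Int.fdiv_eq_ediv]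
  norm_num

lemma mod_natCast_ten (m : ℕ) : PySem.Int.mod (m : Int) 10 = ((m % 10 : ℕ) : Int) := by
  simp only [PySem.Int.mod]
  simp only [Int.fmod_eq_emod]
  norm_num

lemma solveLoop_digits (m : ℕ) : ∀ (acc : Int),
    solveLoop acc (m : Int) = (Nat.digits 10 m).foldl (fun (a : Int) (d : ℕ) => a * 10 + (d : Int)) acc := by
  induction m using Nat.strong_induction_on with
  | _ m ih =>
    intro acc
    unfold solveLoop
    by_cases hm : 0 < m
    · rw [dif_pos (by exact_mod_cast hm), mod_natCast_ten, floordiv_natCast_ten,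
        ih (m / 10) (Nat.div_lt_self hm (by norm_num)),
        Nat.digits_def' (by norm_num : 1 < 10) hm, List.foldl_cons]
    · have : m = 0 := by omega
      subst this
      simp

lemma toDigitsCore_eq : ∀ (f n : ℕ) (ds : List Char), n ≠ 0 → n < f →
    Nat.toDigitsCore 10 f n ds = ((Nat.digits 10 n).map Nat.digitChar).reverse ++ ds := by
  intro f
  induction f with
  | zero => intro n ds h hf; omega
  | succ f ih =>
    intro n ds h hf
    rw [Nat.toDigitsCore]
    rw [Nat.digits_def' (by norm_num : 1 < 10) (by omega), List.map_cons, List.reverse_cons]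
    by_cases hd : n / 10 = 0
    · simp [hd]
    · rw [if_neg hd, ih (n / 10) _ hd (by omega)]
      simp

lemma toChars_of_pos (n : ℕ) (hn : 0 < n) :
    PySem.Int.toChars (n : Int) = ((Nat.digits 10 n).map Nat.digitChar).reverse := by
  simp only [PySem.Int.toChars]
  rw [if_neg (by omega), Nat.toDigits]
  have : (n : Int).toNat = n := by omega
  rw [this, toDigitsCore_eq (n + 1) n [] (by omega) (by omega), List.append_nil]

lemma digitChar_toNat (d : ℕ) (hd : d < 10) : (Nat.digitChar d).toNat = 48 + d := by
  interval_cases d <;> decide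

lemma foldl_digitChar (l : List ℕ) (h : ∀ d ∈ l, d < 10) : ∀ (acc : Int),
    (l.map Nat.digitChar).foldl (fun total ch => total * 10 + ((ch.toNat : Int) - 48)) acc
      = l.foldl (fun (a : Int) (d : ℕ) => a * 10 + (d : Int)) acc := by
  induction l with
  | nil => intro acc; rfl
  | cons d t iht =>
    intro acc
    simp only [List.map_cons, List.foldl_cons]
    rw [digitChar_toNat d (h d (by simp))]
    have : (acc * 10 + (((48 + d : ℕ) : Int) - 48)) = acc * 10 + (d : Int) := by push_cast; ring
    rw [this, iht (fun x hx => h x (by simp [hx]))]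

lemma dropLast_reverse {α : Type} (l : List α) : l.reverse.dropLast = l.tail.reverse := by
  cases l with
  | nil => rfl
  | cons a t => rw [List.reverse_cons, List.dropLast_concat, List.tail_cons]

-- ===== VERDICT (by name: the statement is the Claim_ definition above) =====
theorem solve_spec : Claim_equal_solve := by
  intro pre is_odd _ hpre
  unfold Pre_solve at hpre
  unfold Spec_solve solve solve_alt
  obtain ⟨n, rfl⟩ : ∃ n : ℕ, pre = (n : Int) := ⟨pre.toNat, by omega⟩
  by_cases hn : 0 < n
  · rw [toChars_of_pos n hn]
    have hlt : ∀ d ∈ Nat.digits 10 n, d < 10 := fun d hd => Nat.digits_lt_base (by norm_num) hd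
    cases is_odd with
    | false =>
      simp only [Bool.false_eq_true, if_false]
      rw [List.reverse_reverse, foldl_digitChar _ hlt, solveLoop_digits]
    | true =>
      simp only [if_true]
      rw [PySem.List.slice_to_neg_one, dropLast_reverse, List.reverse_reverse,
        ← List.map_tail, floordiv_natCast_ten, solveLoop_digits,
        Nat.digits_def' (by norm_num : 1 < 10) hn, List.tail_cons,
        foldl_digitChar _ (fun d hd => hlt d (by rw [Nat.digits_def' (by norm_num : 1 < 10) hn]; exact List.mem_cons_of_mem _ hd))]
  · have : n = 0 := by omega
    subst this
    cases is_odd with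
    | false =>
      unfold solveLoop
      norm_num [PySem.Int.toChars, Nat.toDigits, Nat.toDigitsCore, Nat.digitChar]
      decide
    | true =>
      simp only [if_true, floordiv_natCast_ten]
      unfold solveLoop
      norm_num [PySem.Int.toChars, Nat.toDigits, Nat.toDigitsCore, PySem.List.slice_to_neg_one]
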